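-- pv_equiv track=rewrite | github.com/meridian-flow/meridian-cli | src/meridian/cli/main.py | _mars_subcommand
-- ===== SOURCE A (Python) =====
-- from collections.abc import Sequence
--
-- def _mars_subcommand(args: Sequence[str]) -> str | None:
--     index = 0
--     while index < len(args):
--         token = args[index]
--         if token == "--":
--             return None
--         if token == "--root":
--             index += 2
--             continue
--         if token.startswith("--root="):
--             index += 1
--             continue
--         if token.startswith("-"):
--             index += 1
--             continue
--         return token
--     return None
-- ===== SOURCE B (Python) =====
-- def _mars_subcommand(args):
--     # Pass 1: mark each position that is consumed as the value of an
--     # unconsumed "--root" flag (chained: a "--root" that is itself a value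
--     # does not consume the next token).
--     consumed = []
--     prev_root = False
--     for token in args:
--         consumed.append(prev_root)
--         prev_root = (token == "--root") and not prev_root
--     # Pass 2: the first unconsumed token that is "--" or a non-flag decides.
--     for token, c in zip(args, consumed):
--         if c:
--             continue
--         if token == "--":
--             return None
--         if not token.startswith("-"):
--             return token
--     return None
-- ===== Notes on version B (the rewrite author's own statement) =====
-- stated objective: alternative
-- what changed: Replaces A's single index-jumping scan by a two-pass mark-then-select algorithm: pass 1 builds a boolean list marking positions consumed as the value of an unconsumed --root flag, pass 2 picks the first unconsumed token that is '--' (None) or a non-flag (returned).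
import Mathlib
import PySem

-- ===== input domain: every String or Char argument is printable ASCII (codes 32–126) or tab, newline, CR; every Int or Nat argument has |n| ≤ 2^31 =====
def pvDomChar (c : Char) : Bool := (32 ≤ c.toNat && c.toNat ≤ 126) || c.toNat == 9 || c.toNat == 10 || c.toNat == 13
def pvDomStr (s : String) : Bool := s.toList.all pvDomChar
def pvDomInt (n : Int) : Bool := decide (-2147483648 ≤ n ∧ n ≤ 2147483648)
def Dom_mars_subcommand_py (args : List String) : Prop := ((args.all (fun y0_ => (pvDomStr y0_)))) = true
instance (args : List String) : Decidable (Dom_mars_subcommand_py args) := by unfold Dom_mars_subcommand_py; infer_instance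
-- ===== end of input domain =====

-- B replaces A's index-jumping scan with a two-pass mark-then-select algorithm (alternative; same cost); return value only.


-- ===== PORT A =====
-- Literal port of A: while-loop over an explicit index, ported as recursion on the index.
def marsLoopA (args : List String) (index : Nat) : Option String :=
  if h : index < args.length then
    let token := args[index]
    if token == "--" then none
    else if token == "--root" then marsLoopA args (index + 2)
    else if PySem.Str.startswith token "--root=" then marsLoopA args (index + 1)
    else if PySem.Str.startswith token "-" then marsLoopA args (index + 1)
    else some token
  else none
termination_by args.length - index

def mars_subcommand_py (args : List String) : Option String := marsLoopA args 0

-- ===== PORT B =====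
-- Pass 1 of B: the list of "consumed as value of an unconsumed --root" flags.
def marsConsumed : List String → Bool → List Bool
  | [], _ => []
  | token :: rest, prev_root => prev_root :: marsConsumed rest (token == "--root" && !prev_root)

-- Pass 2 of B: first unconsumed token that is "--" or a non-flag decides.
def marsSelect : List (String × Bool) → Option String
  | [] => none
  | (token, c) :: rest =>
    if c then marsSelect rest
    else if token == "--" then none
    else if !(PySem.Str.startswith token "-") then some token
    else marsSelect rest

def mars_subcommand_py_alt (args : List String) : Option String :=
  marsSelect (args.zip (marsConsumed args false))

-- ===== PRECONDITION & SPEC =====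
def Spec_mars_subcommand_py (args : List String) (out : Option String) : Prop := out = mars_subcommand_py_alt args
instance (args : List String) (out : Option String) : Decidable (Spec_mars_subcommand_py args out) := by unfold Spec_mars_subcommand_py; infer_instance

-- ===== CLAIM (what is proved, stated in full; the proofs are below) =====
def Claim_equal_mars_subcommand_py : Prop := ∀ (args : List String), Dom_mars_subcommand_py args → Spec_mars_subcommand_py args (mars_subcommand_py args)

-- ===== LEMMAS AND PROOFS =====
-- fB xs prev = B's two passes run on xs with initial prev_root state.
def fB (xs : List String) (prev : Bool) : Option String :=
  marsSelect (xs.zip (marsConsumed xs prev))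

theorem fB_nil (prev : Bool) : fB [] prev = none := rfl

theorem fB_cons (t : String) (rest : List String) (prev : Bool) :
    fB (t :: rest) prev =
      if prev then fB rest false
      else if t == "--" then none
      else if !(PySem.Str.startswith t "-") then some t
      else fB rest (t == "--root") := by
  unfold fB
  rw [show marsConsumed (t :: rest) prev = prev :: marsConsumed rest (t == "--root" && !prev) from rfl,
      List.zip_cons_cons, marsSelect]
  by_cases hp : prev <;> simp [hp]

-- consuming one token from state true returns to state false
theorem fB_true (xs : List String) : fB xs true = fB xs.tail false := by
  cases xs with
  | nil => rfl
  | cons t rest => rw [fB_cons]; simp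

theorem marsLoopA_eq_fB_drop (args : List String) (index : Nat) :
    marsLoopA args index = fB (args.drop index) false := by
  by_cases h : index < args.length
  · rw [marsLoopA]
    have hd : args.drop index = args[index] :: args.drop (index + 1) :=
      List.drop_eq_getElem_cons h
    have htl : args.drop (index + 2) = (args.drop (index + 1)).tail := by
      rw [← List.drop_drop]; simp [List.tail_drop]
    simp only [h, dif_pos]
    rw [hd, fB_cons]
    simp only [Bool.false_eq_true, if_false]
    by_cases h1 : args[index] == "--"
    · simp [h1]
    · rw [if_neg h1, if_neg h1]
      by_cases h2 : args[index] == "--root"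
      · have hs : PySem.Str.startswith args[index] "-" = true := by
          rw [eq_of_beq h2]; decide
        rw [if_pos h2, hs]
        simp only [Bool.not_true, Bool.false_eq_true, if_false, h2]
        rw [marsLoopA_eq_fB_drop args (index + 2), htl, ← fB_true]
      · rw [if_neg h2]
        by_cases h3 : PySem.Str.startswith args[index] "--root=" = true
        · have hs : PySem.Str.startswith args[index] "-" = true := by
            rw [PySem.Str.startswith_eq] at h3 ⊢
            rw [PySem.Chars.startswith_iff] at h3 ⊢
            exact List.IsPrefix.trans (by decide) h3
          rw [if_pos h3, hs]
          simp only [Bool.not_true, Bool.false_eq_true, if_false, h2, if_false]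
          exact marsLoopA_eq_fB_drop args (index + 1)
        · rw [if_neg h3]
          by_cases h4 : PySem.Str.startswith args[index] "-" = true
          · rw [if_pos h4, h4]
            simp only [Bool.not_true, Bool.false_eq_true, if_false, h2, if_false]
            exact marsLoopA_eq_fB_drop args (index + 1)
          · rw [if_neg h4]
            have : PySem.Str.startswith args[index] "-" = false :=
              Bool.eq_false_iff.mpr h4
            rw [this]
            simp
  · rw [marsLoopA]
    have hnil : args.drop index = [] := List.drop_eq_nil_of_le (Nat.le_of_not_lt h)
    rw [hnil]
    simp [h, fB_nil]
termination_by args.length - index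

-- ===== VERDICT (by name: the statement is the Claim_ definition above) =====
theorem mars_subcommand_py_spec : Claim_equal_mars_subcommand_py := by
  intro args _
  unfold Spec_mars_subcommand_py mars_subcommand_py mars_subcommand_py_alt
  have := marsLoopA_eq_fB_drop args 0
  simpa [fB] using this
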